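-- pv_equiv track=rewrite | github.com/DarkDecember101/AISEP-Capstone-AI | src/modules/recommendation/application/services/recommendation_engine.py | _normalize_warning_flags
-- ===== SOURCE A (Python) =====
-- from typing import Any, Dict, List, Optional
--
-- def _normalize_warning_flags(values: List[str]) -> List[str]:
--     """Deduplicate, strip, and sort warning flags for deterministic output."""
--     seen: set[str] = set()
--     unique: list[str] = []
--     for value in values:
--         key = value.strip()
--         if key and key not in seen:
--             seen.add(key)
--             unique.append(key)
--     unique.sort()
--     return unique
-- ===== SOURCE B (Python) =====
-- from typing import Any, Dict, List, Optional
--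
-- def _normalize_warning_flags(values: List[str]) -> List[str]:
--     """Deduplicate, strip, and sort warning flags for deterministic output."""
--     flags = sorted(s for s in (v.strip() for v in values) if s)
--     out: list[str] = []
--     prev = None
--     for flag in flags:
--         if flag != prev:
--             out.append(flag)
--             prev = flag
--     return out
-- ===== Notes on version B (the rewrite author's own statement) =====
-- stated objective: alternative
-- what changed: B drops A's seen-set membership dedup before sorting: it sorts the full stripped nonempty list and collapses duplicates in a single post-sort adjacency pass (compare each element with the previously emitted one).
import Mathlib
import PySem

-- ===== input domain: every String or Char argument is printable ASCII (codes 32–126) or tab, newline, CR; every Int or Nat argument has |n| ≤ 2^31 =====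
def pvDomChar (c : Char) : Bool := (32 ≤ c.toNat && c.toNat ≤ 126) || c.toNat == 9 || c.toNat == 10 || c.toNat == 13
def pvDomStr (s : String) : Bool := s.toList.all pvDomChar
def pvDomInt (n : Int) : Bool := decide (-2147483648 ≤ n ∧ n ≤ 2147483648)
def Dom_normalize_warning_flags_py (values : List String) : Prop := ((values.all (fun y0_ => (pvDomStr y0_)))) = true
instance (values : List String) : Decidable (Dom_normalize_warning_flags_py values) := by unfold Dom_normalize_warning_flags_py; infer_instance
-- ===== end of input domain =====

-- B replaces A's pre-sort seen-set dedup by sorting the full stripped nonempty list and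
-- collapsing duplicates in one post-sort adjacency pass (objective: alternative, same cost).

-- ===== PORT A =====
-- A's for-loop: seen set + unique list accumulator
def pvALoop (acc : PySem.Set String × List String) : List String → PySem.Set String × List String
  | [] => acc
  | value :: rest =>
      let key := PySem.Str.strip value
      if (!(key == "")) && !(PySem.Set.contains acc.1 key) then
        pvALoop (PySem.Set.add acc.1 key, acc.2 ++ [key]) rest
      else pvALoop acc rest

def normalize_warning_flags_py (values : List String) : List String :=
  PySem.List.sorted (pvALoop (PySem.Set.empty, []) values).2 (fun x => x) false

-- ===== PORT B =====
-- B's for-loop: adjacency pass over the sorted flags, tracking the previous element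
def pvBLoop (out : List String) (prev : Option String) : List String → List String
  | [] => out
  | flag :: rest =>
      if some flag ≠ prev then pvBLoop (out ++ [flag]) (some flag) rest
      else pvBLoop out prev rest

def normalize_warning_flags_py_alt (values : List String) : List String :=
  let flags := PySem.List.sorted
    ((values.map PySem.Str.strip).filter (fun s => !(s == ""))) (fun x => x) false
  pvBLoop [] none flags

-- ===== PRECONDITION & SPEC =====
def Spec_normalize_warning_flags_py (values : List String) (out : List String) : Prop := out = normalize_warning_flags_py_alt values
instance (values : List String) (out : List String) : Decidable (Spec_normalize_warning_flags_py values out) := by unfold Spec_normalize_warning_flags_py; infer_instance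

-- ===== CLAIM (what is proved, stated in full; the proofs are below) =====
def Claim_equal_normalize_warning_flags_py : Prop := ∀ (values : List String), Dom_normalize_warning_flags_py values → Spec_normalize_warning_flags_py values (normalize_warning_flags_py values)

-- ===== LEMMAS AND PROOFS =====

-- the stripped nonempty flags of the input
def pvL (values : List String) : List String :=
  (values.map PySem.Str.strip).filter (fun s => !(s == ""))

-- A's loop keeps seen and unique identical and accumulates Set.add over pvL
lemma loopA (values : List String) (s : PySem.Set String) :
    pvALoop (s, s) values = (PySem.Set.update s (pvL values), PySem.Set.update s (pvL values)) := by
  induction values generalizing s with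
  | nil => simp [pvALoop, pvL, PySem.Set.update]
  | cons v vs ih =>
    by_cases hk : PySem.Str.strip v = ""
    · have hL : pvL (v :: vs) = pvL vs := by simp [pvL, hk]
      rw [pvALoop, if_neg (by simp [hk]), ih s, hL]
    · have hL : pvL (v :: vs) = PySem.Str.strip v :: pvL vs := by simp [pvL, hk]
      have hupd : ∀ (t : PySem.Set String) (x : String) (l : List String),
          PySem.Set.update t (x :: l) = PySem.Set.update (PySem.Set.add t x) l := by
        intro t x l; rfl
      by_cases hc : PySem.Set.contains s (PySem.Str.strip v) = true
      · have hmem : PySem.Str.strip v ∈ s := by simpa [PySem.Set.contains] using hc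
        have hadd : PySem.Set.add s (PySem.Str.strip v) = s := by
          simp [PySem.Set.add, hmem]
        rw [pvALoop, if_neg (by simp [hmem, PySem.Set.contains]), ih s, hL, hupd, hadd]
      · have hmem : PySem.Str.strip v ∉ s := by simpa [PySem.Set.contains] using hc
        rw [pvALoop, if_pos (by simp [hk, hmem, PySem.Set.contains])]
        have hsnd : ((s, s) : PySem.Set String × List String).2 ++ [PySem.Str.strip v]
            = PySem.Set.add ((s, s) : PySem.Set String × List String).1 (PySem.Str.strip v) := by
          simp only []
          simp [PySem.Set.add, hmem]
        rw [hsnd, ih (PySem.Set.add s (PySem.Str.strip v)), hL, hupd]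

-- adjacency collapse with a known previous element (proof-side model of B's loop)
def adj (p : String) : List String → List String
  | [] => []
  | f :: fs => if f = p then adj p fs else f :: adj f fs

-- B's loop from state (out, some p) appends adj p
lemma loopB (fs : List String) (out : List String) (p : String) :
    pvBLoop out (some p) fs = out ++ adj p fs := by
  induction fs generalizing out p with
  | nil => simp [pvBLoop, adj]
  | cons f fs ih =>
    by_cases hf : f = p
    · subst hf
      rw [pvBLoop, if_neg (by simp), ih out f]
      simp [adj]
    · rw [pvBLoop, if_pos (by simp [hf]), ih (out ++ [f]) f]
      simp [adj, hf]

-- on a (≤)-sorted tail whose elements dominate p, adj yields the strictly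
-- increasing list of elements different from p
lemma adj_spec (fs : List String) (p : String)
    (hp : ∀ y ∈ fs, p ≤ y) (hs : fs.Pairwise (· ≤ ·)) :
    (∀ x, x ∈ adj p fs ↔ x ∈ fs ∧ x ≠ p) ∧ (adj p fs).Pairwise (· < ·) ∧
      (∀ x ∈ adj p fs, p < x) := by
  induction fs generalizing p with
  | nil => simp [adj]
  | cons f fs ih =>
    rw [List.pairwise_cons] at hs
    by_cases hf : f = p
    · subst hf
      have hadjeq : adj f (f :: fs) = adj f fs := by simp [adj]
      rw [hadjeq]
      have h := ih f (fun y hy => hs.1 y hy) hs.2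
      refine ⟨fun x => ?_, h.2.1, h.2.2⟩
      rw [h.1 x, List.mem_cons]
      constructor
      · rintro ⟨hx, hne⟩; exact ⟨Or.inr hx, hne⟩
      · rintro ⟨hx | hx, hne⟩
        · exact absurd hx hne
        · exact ⟨hx, hne⟩
    · have hadjeq : adj p (f :: fs) = f :: adj f fs := by simp [adj, hf]
      rw [hadjeq]
      have h := ih f (fun y hy => hs.1 y hy) hs.2
      have hpf : p < f := lt_of_le_of_ne (hp f (List.mem_cons_self)) (Ne.symm hf)
      refine ⟨fun x => ?_, ?_, ?_⟩
      · rw [List.mem_cons, List.mem_cons, h.1 x]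
        constructor
        · rintro (rfl | ⟨hx, _⟩)
          · exact ⟨Or.inl rfl, Ne.symm (ne_of_lt hpf)⟩
          · exact ⟨Or.inr hx, Ne.symm (ne_of_lt (lt_of_lt_of_le hpf (hs.1 x hx)))⟩
        · rintro ⟨rfl | hx, hne⟩
          · exact Or.inl rfl
          · by_cases hxf : x = f
            · exact Or.inl hxf
            · exact Or.inr ⟨hx, hxf⟩
      · rw [List.pairwise_cons]
        exact ⟨fun y hy => h.2.2 y hy, h.2.1⟩
      · intro x hx
        rw [List.mem_cons] at hx
        rcases hx with rfl | hx
        · exact hpf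
        · exact lt_trans hpf (h.2.2 x hx)

-- two strictly increasing lists with the same members are equal
lemma eq_of_pairwise_lt_ext (l₁ : List String) :
    ∀ (l₂ : List String), l₁.Pairwise (· < ·) → l₂.Pairwise (· < ·) →
      (∀ x, x ∈ l₁ ↔ x ∈ l₂) → l₁ = l₂ := by
  induction l₁ with
  | nil =>
    intro l₂ _ _ hm
    cases l₂ with
    | nil => rfl
    | cons b m => exact absurd ((hm b).mpr List.mem_cons_self) (by simp)
  | cons a l ih =>
    intro l₂ h1 h2 hm
    cases l₂ with
    | nil => exact absurd ((hm a).mp List.mem_cons_self) (by simp)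
    | cons b m =>
      rw [List.pairwise_cons] at h1 h2
      have hab : a = b := by
        rcases List.mem_cons.mp ((hm a).mp List.mem_cons_self) with h | ha
        · exact h
        · rcases List.mem_cons.mp ((hm b).mpr List.mem_cons_self) with h | hb
          · exact h.symm
          · exact absurd (lt_trans (h1.1 b hb) (h2.1 a ha)) (lt_irrefl a)
      subst hab
      have htail : ∀ x, x ∈ l ↔ x ∈ m := by
        intro x
        constructor
        · intro hx
          rcases List.mem_cons.mp ((hm x).mp (List.mem_cons_of_mem a hx)) with rfl | h
          · exact absurd (h1.1 x hx) (lt_irrefl x)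
          · exact h
        · intro hx
          rcases List.mem_cons.mp ((hm x).mpr (List.mem_cons_of_mem a hx)) with rfl | h
          · exact absurd (h2.1 x hx) (lt_irrefl x)
          · exact h
      rw [ih m h1.2 h2.2 htail]

-- A computes sorted(set(pvL values))
lemma portA_eq (values : List String) :
    normalize_warning_flags_py values
      = PySem.List.sorted (PySem.Set.ofList (pvL values)) (fun x => x) false := by
  unfold normalize_warning_flags_py
  rw [show (PySem.Set.empty : PySem.Set String) = ([] : PySem.Set String) from rfl,
    loopA values []]
  have h : PySem.Set.update ([] : PySem.Set String) (pvL values) = PySem.Set.ofList (pvL values) := by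
    rw [PySem.Set.ofList_eq_foldl]; rfl
  rw [h]

-- ===== VERDICT (by name: the statement is the Claim_ definition above) =====
theorem normalize_warning_flags_py_spec : Claim_equal_normalize_warning_flags_py := by
  intro values _
  unfold Spec_normalize_warning_flags_py
  rw [portA_eq]
  show _ = pvBLoop [] none (PySem.List.sorted (pvL values) (fun x => x) false)
  have hperm : (PySem.List.sorted (pvL values) (fun x => x) false).Perm (pvL values) :=
    PySem.List.sorted_perm _ _ _
  have hsorted : (PySem.List.sorted (pvL values) (fun x => x) false).Pairwise (· ≤ ·) :=
    PySem.List.sorted_pairwise (pvL values) (fun x => x)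
  cases hfl : PySem.List.sorted (pvL values) (fun x => x) false with
  | nil =>
    rw [hfl] at hperm
    have hL0 : pvL values = [] := (List.Perm.nil_eq hperm).symm
    simp [hL0, pvBLoop, PySem.Set.ofList, PySem.List.sorted]
  | cons f fs =>
    rw [hfl] at hperm hsorted
    rw [List.pairwise_cons] at hsorted
    rw [pvBLoop, if_pos (by simp), loopB fs ([] ++ [f]) f]
    rw [show (([] ++ [f] : List String)) = [f] from rfl]
    have hadj := adj_spec fs f hsorted.1 hsorted.2
    apply eq_of_pairwise_lt_ext
    · exact PySem.List.sorted_ofList_pairwise_lt (pvL values)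
    · rw [show (([f] ++ adj f fs) : List String) = f :: adj f fs from rfl, List.pairwise_cons]
      exact ⟨fun y hy => hadj.2.2 y hy, hadj.2.1⟩
    · intro x
      rw [PySem.List.mem_sorted, PySem.Set.mem_ofList, ← hperm.mem_iff,
        show (([f] ++ adj f fs) : List String) = f :: adj f fs from rfl,
        List.mem_cons, List.mem_cons, hadj.1 x]
      constructor
      · rintro (rfl | hx)
        · exact Or.inl rfl
        · by_cases hxf : x = f
          · exact Or.inl hxf
          · exact Or.inr ⟨hx, hxf⟩
      · rintro (rfl | ⟨hx, _⟩)
        · exact Or.inl rfl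
        · exact Or.inr hx
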